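-- pv_equiv track=rewrite | github.com/scmmmh/automarking | src/automarking/tests.py | extract_code
-- ===== SOURCE A (Python) =====
-- def extract_code(source, start_identifier='// StartStudentCode', end_identifier='// EndStudentCode'):
--     pre = []
--     code = []
--     post = []
--     state = 0
--     for line in source:
--         if state == 0 and line.strip() == start_identifier:
--             state = 1
--         elif state == 1 and line.strip() == end_identifier:
--             state = 2
--         elif state == 0:
--             pre.append(line)
--         elif state == 1:
--             code.append(line)
--         elif state == 2:
--             post.append(line)
--     return ('\n'.join(pre), '\n'.join(code), '\n'.join(post))
-- ===== SOURCE B (Python) =====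
-- def extract_code(source, start_identifier='// StartStudentCode', end_identifier='// EndStudentCode'):
--     lines = list(source)
--     i = next((k for k, line in enumerate(lines) if line.strip() == start_identifier), None)
--     if i is None:
--         return ('\n'.join(lines), '', '')
--     j = next((k for k in range(i + 1, len(lines)) if lines[k].strip() == end_identifier), None)
--     if j is None:
--         return ('\n'.join(lines[:i]), '\n'.join(lines[i + 1:]), '')
--     return ('\n'.join(lines[:i]), '\n'.join(lines[i + 1:j]), '\n'.join(lines[j + 1:]))
-- ===== Notes on version B (the rewrite author's own statement) =====
-- stated objective: simpler
-- what changed: Replaced A's three-state accumulation loop with one-shot boundary finding (index of first start marker, then first end marker after it) followed by list slicing and joins.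
import Mathlib
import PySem

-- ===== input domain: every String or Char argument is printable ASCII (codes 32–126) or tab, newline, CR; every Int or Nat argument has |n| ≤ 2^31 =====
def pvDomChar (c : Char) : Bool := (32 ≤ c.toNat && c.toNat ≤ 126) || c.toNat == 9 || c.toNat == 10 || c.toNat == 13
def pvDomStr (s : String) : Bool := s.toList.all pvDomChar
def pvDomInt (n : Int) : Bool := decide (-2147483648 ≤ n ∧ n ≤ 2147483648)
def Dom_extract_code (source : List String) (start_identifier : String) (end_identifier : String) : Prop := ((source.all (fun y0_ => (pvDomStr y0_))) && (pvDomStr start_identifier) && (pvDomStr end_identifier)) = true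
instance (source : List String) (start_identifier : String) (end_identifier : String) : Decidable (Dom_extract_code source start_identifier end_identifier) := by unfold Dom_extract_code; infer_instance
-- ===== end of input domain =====

-- B replaces A's three-state accumulation loop with one-shot boundary finding (first start/end marker indices) plus list slicing; objective: simpler decomposition, same cost.


-- ===== PORT A =====
-- one loop step of A's state machine; state 0 = pre, 1 = code, 2 = post
def pvStepA (start_identifier end_identifier : String)
    (st : (List String × List String × List String) × Int) (line : String) :
    (List String × List String × List String) × Int :=
  let pre := st.1.1
  let code := st.1.2.1
  let post := st.1.2.2
  let state := st.2
  if state == 0 && PySem.Str.strip line == start_identifier then ((pre, code, post), 1)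
  else if state == 1 && PySem.Str.strip line == end_identifier then ((pre, code, post), 2)
  else if state == 0 then ((pre ++ [line], code, post), state)
  else if state == 1 then ((pre, code ++ [line], post), state)
  else if state == 2 then ((pre, code, post ++ [line]), state)
  else st

def extract_code (source : List String) (start_identifier : String) (end_identifier : String) : String × String × String :=
  let r := source.foldl (pvStepA start_identifier end_identifier) (([], [], []), 0)
  (PySem.Str.join "\n" r.1.1, PySem.Str.join "\n" r.1.2.1, PySem.Str.join "\n" r.1.2.2)

-- ===== PORT B =====
def extract_code_alt (source : List String) (start_identifier : String) (end_identifier : String) : String × String × String :=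
  match List.findIdx? (fun line => PySem.Str.strip line == start_identifier) source with
  | none => (PySem.Str.join "\n" source, "", "")
  | some i =>
    match List.findIdx? (fun line => PySem.Str.strip line == end_identifier) (source.drop (i + 1)) with
    | none => (PySem.Str.join "\n" (source.take i), PySem.Str.join "\n" (source.drop (i + 1)), "")
    | some r =>
      (PySem.Str.join "\n" (source.take i),
       PySem.Str.join "\n" ((source.drop (i + 1)).take r),
       PySem.Str.join "\n" (source.drop (i + 1 + r + 1)))

-- ===== PRECONDITION & SPEC =====
def Spec_extract_code (source : List String) (start_identifier : String) (end_identifier : String) (out : String × String × String) : Prop := out = extract_code_alt source start_identifier end_identifier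
instance (source : List String) (start_identifier : String) (end_identifier : String) (out : String × String × String) : Decidable (Spec_extract_code source start_identifier end_identifier out) := by unfold Spec_extract_code; infer_instance

-- ===== CLAIM (what is proved, stated in full; the proofs are below) =====
def Claim_equal_extract_code : Prop := ∀ (source : List String) (start_identifier : String) (end_identifier : String), Dom_extract_code source start_identifier end_identifier → Spec_extract_code source start_identifier end_identifier (extract_code source start_identifier end_identifier)

-- ===== LEMMAS AND PROOFS =====

-- from state 2, every remaining line is appended to post
theorem pvFold2 (s e : String) (src pre code post : List String) :
    src.foldl (pvStepA s e) ((pre, code, post), 2) = ((pre, code, post ++ src), 2) := by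
  induction src generalizing post with
  | nil => simp
  | cons a t ih => simp [pvStepA, ih]

-- from state 1, the loop matches "find end marker, slice"
theorem pvFold1 (s e : String) (src pre code post : List String) :
    src.foldl (pvStepA s e) ((pre, code, post), 1) =
      match List.findIdx? (fun line => PySem.Str.strip line == e) src with
      | none => ((pre, code ++ src, post), 1)
      | some r => ((pre, code ++ src.take r, post ++ src.drop (r + 1)), 2) := by
  induction src generalizing code with
  | nil => simp
  | cons a t ih =>
    by_cases h : PySem.Str.strip a == e
    · rw [List.foldl_cons,
        show pvStepA s e ((pre, code, post), 1) a = ((pre, code, post), 2) from by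
          simp [pvStepA, h],
        pvFold2]
      simp [List.findIdx?_cons, h]
    · rw [List.foldl_cons,
        show pvStepA s e ((pre, code, post), 1) a = ((pre, code ++ [a], post), 1) from by
          simp [pvStepA, h],
        ih]
      cases hf : List.findIdx? (fun line => PySem.Str.strip line == e) t <;>
        simp [List.findIdx?_cons, h, hf]

-- from state 0, the loop matches "find start marker, then state 1"
theorem pvFold0 (s e : String) (src pre code post : List String) :
    src.foldl (pvStepA s e) ((pre, code, post), 0) =
      match List.findIdx? (fun line => PySem.Str.strip line == s) src with
      | none => ((pre ++ src, code, post), 0)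
      | some i =>
        match List.findIdx? (fun line => PySem.Str.strip line == e) (src.drop (i + 1)) with
        | none => ((pre ++ src.take i, code ++ src.drop (i + 1), post), 1)
        | some r => ((pre ++ src.take i, code ++ (src.drop (i + 1)).take r,
                      post ++ (src.drop (i + 1)).drop (r + 1)), 2) := by
  induction src generalizing pre with
  | nil => simp
  | cons a t ih =>
    by_cases h : PySem.Str.strip a == s
    · rw [List.foldl_cons,
        show pvStepA s e ((pre, code, post), 0) a = ((pre, code, post), 1) from by
          simp [pvStepA, h],
        pvFold1]
      cases hf : List.findIdx? (fun line => PySem.Str.strip line == e) t <;>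
        simp [List.findIdx?_cons, h, hf]
    · rw [List.foldl_cons,
        show pvStepA s e ((pre, code, post), 0) a = ((pre ++ [a], code, post), 0) from by
          simp [pvStepA, h],
        ih]
      cases hf : List.findIdx? (fun line => PySem.Str.strip line == s) t with
      | none => simp [List.findIdx?_cons, h, hf]
      | some i =>
        cases hg : List.findIdx? (fun line => PySem.Str.strip line == e) (t.drop (i + 1)) <;>
          simp [List.findIdx?_cons, h, hf, hg]

-- ===== VERDICT (by name: the statement is the Claim_ definition above) =====
theorem extract_code_spec : Claim_equal_extract_code := by
  intro source s e _
  unfold Spec_extract_code extract_code extract_code_alt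
  rw [pvFold0]
  cases hf : List.findIdx? (fun line => PySem.Str.strip line == s) source with
  | none => simp [PySem.Str.join]
  | some i =>
    cases hg : List.findIdx? (fun line => PySem.Str.strip line == e) (source.drop (i + 1)) with
    | none => simp [hg, PySem.Str.join]
    | some r =>
      simp only [hg, List.drop_drop]
      exact Prod.ext rfl (Prod.ext rfl rfl)
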